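-- pv_equiv track=rewrite | github.com/simon-bachhuber/ring | x_xy/sys_composer/morph_sys.py | _new_to_old_indices
-- ===== SOURCE A (Python) =====
-- def _new_to_old_indices(new_parents: list[int]) -> list[int]:
--     # aka permutation
--     # permutation maps from new index to the old index, so e.g. at index position 0
--     # is in the new system the link with index permutation[0] in the old system
--     new_indices = []
--
--     def find_childs_of(parent: int):
--         for i, p in enumerate(new_parents):
--             if p == parent:
--                 new_indices.append(i)
--                 find_childs_of(i)
--
--     find_childs_of(-1)
--     return new_indices + [-1]
-- ===== SOURCE B (Python) =====
-- def _new_to_old_indices(new_parents: list[int]) -> list[int]: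
--     # Every link attached (possibly indirectly) to the world root -1 is uniquely
--     # identified by its root path: the chain of indices from the root down to it.
--     # A preorder DFS that visits children in index order lists exactly those links
--     # in lexicographic order of their root paths, so instead of traversing the
--     # tree we compute each link's root path and sort by it.
--     n = len(new_parents)
--
--     def root_path(i):
--         rev = []
--         j = i
--         while True:
--             if j == -1:
--                 return rev[::-1]
--             if not 0 <= j < n or j in rev:
--                 return None  # detached from the root, or on a cycle
--             rev.append(j)
--             j = new_parents[j]
--
--     keyed = [(p, i) for i in range(n) if (p := root_path(i)) is not None]
--     keyed.sort(key=lambda t: t[0])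
--     return [i for _, i in keyed] + [-1]
-- ===== Notes on version B (the rewrite author's own statement) =====
-- stated objective: alternative
-- what changed: B does no tree traversal at all: it computes each link's root path (the chain of indices from the virtual root -1 down to the link) by walking parent pointers, and sorts the attached links lexicographically by that path, which coincides with A's recursive preorder DFS output.
import Mathlib
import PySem

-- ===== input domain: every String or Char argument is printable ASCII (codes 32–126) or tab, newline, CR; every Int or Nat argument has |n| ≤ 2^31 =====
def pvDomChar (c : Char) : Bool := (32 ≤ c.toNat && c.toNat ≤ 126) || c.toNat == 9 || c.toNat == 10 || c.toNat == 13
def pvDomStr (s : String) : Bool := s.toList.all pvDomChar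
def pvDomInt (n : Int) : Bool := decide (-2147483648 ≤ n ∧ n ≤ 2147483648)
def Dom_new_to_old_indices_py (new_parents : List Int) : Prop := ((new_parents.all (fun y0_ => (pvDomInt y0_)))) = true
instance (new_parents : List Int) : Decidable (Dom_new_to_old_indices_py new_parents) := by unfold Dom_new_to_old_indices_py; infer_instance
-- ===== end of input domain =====

-- B does no tree traversal: it computes each attached link's root path by walking
-- parent pointers and sorts links lexicographically by that path (objective: alternative).


-- ===== PORT A =====
-- 'find_childs_of': scan enumerate(new_parents); on a match append the index and
-- recurse into it.  Fuel (length+1) only makes the recursion total; the Python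
-- recursion depth is bounded by the number of links on a root path.
def findChildsOfA (ps : List Int) : Nat → Int → List Int → List Int
  | 0, _, acc => acc
  | fuel+1, parent, acc =>
      (PySem.List.enumerate ps).foldl
        (fun a ip =>
          if ip.2 == parent then findChildsOfA ps fuel ip.1 (a ++ [ip.1]) else a)
        acc

def new_to_old_indices_py (new_parents : List Int) : List Int :=
  findChildsOfA new_parents (new_parents.length + 1) (-1) [] ++ [-1]

-- ===== PORT B =====
-- root_path(i): walk parent pointers collecting the visited indices; reaching -1
-- returns the reversed list, leaving [0,n) or revisiting an index returns None.
-- Fuel (length+1) only makes the loop total: each iteration appends a fresh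
-- index of [0,n) to rev, so the Python loop runs at most n+1 iterations.
def rootPathB (ps : List Int) : Nat → Int → List Int → Option (List Int)
  | 0, _, _ => none
  | f+1, j, rev =>
      if j = -1 then some rev.reverse
      else if 0 ≤ j ∧ j < PySem.List.len ps ∧ j ∉ rev then
        rootPathB ps f (PySem.List.pyGetD ps j 0) (rev ++ [j])
      else none

-- keyed = [(p, i) …]; keyed.sort(key=lambda t: t[0]); [i for _, i in keyed] + [-1]
def new_to_old_indices_py_alt (new_parents : List Int) : List Int :=
  let keyed := (PySem.List.pyRange 0 (PySem.List.len new_parents) 1).filterMap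
      (fun i => (rootPathB new_parents (new_parents.length + 1) i []).map (fun p => (p, i)))
  (PySem.List.sorted keyed (fun t => t.1) false).map (fun t => t.2) ++ [-1]

-- ===== PRECONDITION & SPEC =====
def Spec_new_to_old_indices_py (new_parents : List Int) (out : List Int) : Prop := out = new_to_old_indices_py_alt new_parents
instance (new_parents : List Int) (out : List Int) : Decidable (Spec_new_to_old_indices_py new_parents out) := by unfold Spec_new_to_old_indices_py; infer_instance

-- ===== CLAIM (what is proved, stated in full; the proofs are below) =====
def Claim_equal_new_to_old_indices_py : Prop := ∀ (new_parents : List Int), Dom_new_to_old_indices_py new_parents → Spec_new_to_old_indices_py new_parents (new_to_old_indices_py new_parents)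

-- ===== LEMMAS AND PROOFS =====

-- The parent-pointer chain of a link: Chain ps j c says the walk j, ps[j], …
-- reaches the root -1 and visits exactly the indices in c (j first).
inductive Chain (ps : List Int) : Int → List Int → Prop
  | root : Chain ps (-1) []
  | step {j : Int} {c : List Int} (h0 : 0 ≤ j) (h1 : j < PySem.List.len ps)
      (hc : Chain ps (PySem.List.pyGetD ps j 0) c) : Chain ps j (j :: c)

lemma chain_det {ps : List Int} {j : Int} {c c' : List Int}
    (h : Chain ps j c) (h' : Chain ps j c') : c = c' := by
  induction h generalizing c' with
  | root => cases h' with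
    | root => rfl
    | step h0 h1 hc => omega
  | step h0 h1 hc ih =>
      cases h' with
      | root => omega
      | step h0' h1' hc' => exact congrArg _ (ih hc')

lemma chain_nil_eq {ps : List Int} {j : Int} (h : Chain ps j []) : j = -1 := by
  cases h; rfl

lemma chain_cons_head {ps : List Int} {j p : Int} {t : List Int}
    (h : Chain ps j (p :: t)) : j = p := by cases h; rfl

lemma chain_mem {ps : List Int} {j x : Int} {c : List Int}
    (h : Chain ps j c) (hx : x ∈ c) :
    ∃ t, Chain ps x (x :: t) ∧ (x :: t) <:+ c := by
  induction h with
  | root => cases hx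
  | step h0 h1 hc ih =>
      rename_i j c
      rcases List.mem_cons.1 hx with rfl | hx
      · exact ⟨c, Chain.step h0 h1 hc, List.suffix_refl _⟩
      · obtain ⟨t, ht, hs⟩ := ih hx
        exact ⟨t, ht, hs.trans (List.suffix_cons _ _)⟩

lemma chain_nodup {ps : List Int} {j : Int} {c : List Int}
    (h : Chain ps j c) : c.Nodup := by
  induction h with
  | root => exact List.nodup_nil
  | step h0 h1 hc ih =>
      rename_i j c
      refine List.nodup_cons.2 ⟨?_, ih⟩
      intro hj
      obtain ⟨t, ht, hs⟩ := chain_mem hc hj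
      have hjc := chain_det ht (Chain.step h0 h1 hc)
      injection hjc with _ h2
      subst h2
      have := hs.length_le
      simp only [List.length_cons] at this
      omega

lemma chain_bounds {ps : List Int} {j : Int} {c : List Int}
    (h : Chain ps j c) : ∀ x ∈ c, 0 ≤ x ∧ x < PySem.List.len ps := by
  induction h with
  | root => intro x hx; cases hx
  | step h0 h1 hc ih =>
      intro x hx
      rcases List.mem_cons.1 hx with rfl | hx
      · exact ⟨h0, h1⟩
      · exact ih x hx

lemma chain_length_le {ps : List Int} {j : Int} {c : List Int}
    (h : Chain ps j c) : c.length ≤ ps.length := by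
  have hsub : c ⊆ PySem.List.pyRange 0 (PySem.List.len ps) 1 := by
    intro x hx
    have := chain_bounds h x hx
    rw [PySem.List.mem_pyRange_one]
    simp [PySem.List.len_eq] at this ⊢; omega
  have := (List.subperm_of_subset (chain_nodup h) hsub).length_le
  simpa [PySem.List.length_pyRange_one, PySem.List.len_eq] using this

-- the fueled walk (no accumulator), mirroring rootPathB
def chainW (ps : List Int) : Nat → Int → Option (List Int)
  | 0, _ => none
  | f+1, j =>
      if j = -1 then some []
      else if 0 ≤ j ∧ j < PySem.List.len ps then
        (chainW ps f (PySem.List.pyGetD ps j 0)).map (j :: ·)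
      else none

lemma chainW_some {ps : List Int} :
    ∀ {f : Nat} {j : Int} {c : List Int}, chainW ps f j = some c →
      Chain ps j c ∧ c.length < f := by
  intro f
  induction f with
  | zero => intro j c h; simp [chainW] at h
  | succ f ih =>
      intro j c h
      rw [chainW] at h
      split_ifs at h with h1 h2
      · cases h; subst h1; exact ⟨Chain.root, by simp⟩
      · cases hw : chainW ps f (PySem.List.pyGetD ps j 0) with
        | none => rw [hw] at h; simp at h
        | some c' =>
            rw [hw] at h; simp at h
            obtain ⟨hc, hlen⟩ := ih hw
            subst h
            exact ⟨Chain.step h2.1 h2.2 hc, by simpa using Nat.succ_lt_succ hlen⟩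

lemma chainW_of_chain {ps : List Int} {j : Int} {c : List Int}
    (h : Chain ps j c) : ∀ {f : Nat}, c.length < f → chainW ps f j = some c := by
  induction h with
  | root =>
      intro f hf
      match f, hf with
      | f+1, _ => simp [chainW]
  | step h0 h1 hc ih =>
      rename_i j c
      intro f hf
      match f, hf with
      | f+1, hf =>
          have hj : ¬ j = -1 := by omega
          rw [chainW, if_neg hj, if_pos ⟨h0, h1⟩, ih (by simpa using Nat.lt_of_succ_lt_succ hf)]
          rfl

lemma chainW_stable_iff {ps : List Int} {j : Int} {c : List Int} :
    chainW ps (ps.length + 1) j = some c ↔ Chain ps j c := by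
  constructor
  · intro h; exact (chainW_some h).1
  · intro h; exact chainW_of_chain h (Nat.lt_succ_of_le (chain_length_le h))

-- the walk returns the chain (reversed, behind the accumulator) whenever one exists
lemma rootPathB_of_chain {ps : List Int} {j : Int} {c : List Int}
    (h : Chain ps j c) : ∀ {f : Nat} (rev : List Int), c.length < f →
      (∀ x ∈ c, x ∉ rev) → rootPathB ps f j rev = some ((rev ++ c).reverse) := by
  induction h with
  | root =>
      intro f rev hf _
      match f, hf with
      | f+1, _ => simp [rootPathB]
  | step h0 h1 hc ih =>
      rename_i j c
      intro f rev hf hdisj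
      match f, hf with
      | f+1, hf =>
          have hj : ¬ j = -1 := by omega
          have hnotin : j ∉ rev := hdisj j List.mem_cons_self
          have hnodup := chain_nodup (Chain.step h0 h1 hc)
          rw [rootPathB, if_neg hj, if_pos ⟨h0, h1, hnotin⟩]
          have hd : ∀ x ∈ c, x ∉ rev ++ [j] := by
            intro x hx
            rw [List.mem_append, List.mem_singleton]
            rintro (hr | rfl)
            · exact hdisj x (List.mem_cons_of_mem _ hx) hr
            · exact (List.nodup_cons.1 hnodup).1 hx
          have := ih (rev ++ [j]) (by simpa using Nat.lt_of_succ_lt_succ hf) hd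
          rw [this]
          simp [List.append_assoc]

-- whenever the walk returns, a chain exists and the result is its reversal
lemma chain_of_rootPathB {ps : List Int} :
    ∀ {f : Nat} {j : Int} {rev out : List Int},
      rootPathB ps f j rev = some out →
      ∃ c, Chain ps j c ∧ out = (rev ++ c).reverse := by
  intro f
  induction f with
  | zero => intro j rev out h; simp [rootPathB] at h
  | succ f ih =>
      intro j rev out h
      rw [rootPathB] at h
      split_ifs at h with h1 h2
      · cases h
        exact ⟨[], h1 ▸ Chain.root, by simp⟩
      · obtain ⟨c, hc, rfl⟩ := ih h
        exact ⟨j :: c, Chain.step h2.1 h2.2.1 hc, by simp [List.append_assoc]⟩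

-- with fuel n+1 and an empty accumulator the walk computes the reversed chain
lemma rootPathB_eq_chainW (ps : List Int) (j : Int) :
    rootPathB ps (ps.length + 1) j []
      = (chainW ps (ps.length + 1) j).map (fun c => c.reverse) := by
  cases hw : chainW ps (ps.length + 1) j with
  | some c =>
      have hc := (chainW_some hw).1
      rw [rootPathB_of_chain hc [] (Nat.lt_succ_of_le (chain_length_le hc)) (by simp)]
      simp
  | none =>
      cases hr : rootPathB ps (ps.length + 1) j [] with
      | none => rfl
      | some out =>
          obtain ⟨c, hc, -⟩ := chain_of_rootPathB hr
          rw [chainW_of_chain hc (Nat.lt_succ_of_le (chain_length_le hc))] at hw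
          cases hw

-- the sort key: the root path of a link (reverse of its chain)
def keyOf (ps : List Int) (x : Int) : List Int :=
  ((chainW ps (ps.length + 1) x).getD []).reverse

lemma keyOf_chain {ps : List Int} {x : Int} {c : List Int}
    (h : Chain ps x c) : keyOf ps x = c.reverse := by
  unfold keyOf
  rw [chainW_stable_iff.2 h]
  rfl

-- the children of a node, in increasing index order, as A's scan finds them
def childrenOf (ps : List Int) (parent : Int) : List Int :=
  ((PySem.List.enumerate ps).filter (fun ip => ip.2 == parent)).map (·.1)

lemma mem_childrenOf {ps : List Int} {parent c : Int} :
    c ∈ childrenOf ps parent ↔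
      0 ≤ c ∧ c < PySem.List.len ps ∧ PySem.List.pyGetD ps c 0 = parent := by
  unfold childrenOf
  simp only [List.mem_map, List.mem_filter, PySem.List.mem_enumerate_iff]
  constructor
  · rintro ⟨⟨i, v⟩, ⟨⟨k, hk, hp⟩, hv⟩, rfl⟩
    cases hp
    simp only [beq_iff_eq] at hv
    refine ⟨by simp, ?_, ?_⟩
    · simp only [zero_add, PySem.List.len_eq]; exact_mod_cast hk
    · simp only [zero_add, PySem.List.pyGetD_natCast]
      rw [List.getD_eq_getElem ps 0 hk]
      exact hv
  · rintro ⟨h0, h1, hp⟩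
    have hk : c.toNat < ps.length := by
      simp only [PySem.List.len_eq] at h1; omega
    refine ⟨((c.toNat : Int), ps[c.toNat]), ⟨⟨c.toNat, hk, by simp [Int.toNat_of_nonneg h0]⟩, ?_⟩, by simp [Int.toNat_of_nonneg h0]⟩
    simp only [beq_iff_eq]
    rw [← hp, PySem.List.pyGetD_eq_getElem ps 0 h0 (by simpa [PySem.List.len_eq] using h1)]

lemma pairwise_childrenOf (ps : List Int) (parent : Int) :
    (childrenOf ps parent).Pairwise (· < ·) := by
  unfold childrenOf
  exact List.pairwise_map.2 ((PySem.List.pairwise_lt_enumerate ps 0).filter _)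

lemma chain_child {ps : List Int} {parent c : Int} {cp : List Int}
    (hp : Chain ps parent cp) (hc : c ∈ childrenOf ps parent) :
    Chain ps c (c :: cp) := by
  obtain ⟨h0, h1, hg⟩ := mem_childrenOf.1 hc
  exact Chain.step h0 h1 (hg ▸ hp)

-- accumulator extraction for A's recursion
lemma findA_acc (ps : List Int) :
    ∀ (f : Nat) (parent : Int) (acc : List Int),
      findChildsOfA ps f parent acc = acc ++ findChildsOfA ps f parent [] := by
  intro f
  induction f with
  | zero => intro parent acc; simp [findChildsOfA]
  | succ f ih =>
      intro parent acc
      rw [findChildsOfA, findChildsOfA]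
      generalize PySem.List.enumerate ps = l
      induction l generalizing acc with
      | nil => simp
      | cons ip l ihl =>
          simp only [List.foldl_cons]
          by_cases h : (ip.2 == parent) = true
          · rw [if_pos h, if_pos h, ihl (findChildsOfA ps f ip.1 (acc ++ [ip.1])),
                ihl (findChildsOfA ps f ip.1 ([] ++ [ip.1])),
                ih ip.1 (acc ++ [ip.1]), ih ip.1 ([] ++ [ip.1])]
            simp
          · rw [if_neg h, if_neg h]
            exact ihl acc

-- one unfolding of A's recursion as a flatMap over the children
lemma findA_succ (ps : List Int) (f : Nat) (parent : Int) :
    findChildsOfA ps (f+1) parent []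
      = (childrenOf ps parent).flatMap (fun c => c :: findChildsOfA ps f c []) := by
  rw [findChildsOfA]
  unfold childrenOf
  rw [List.flatMap_map]
  generalize PySem.List.enumerate ps = l
  suffices h : ∀ acc : List Int,
      l.foldl (fun a ip =>
          if ip.2 == parent then findChildsOfA ps f ip.1 (a ++ [ip.1]) else a) acc
        = acc ++ (l.filter (fun ip => ip.2 == parent)).flatMap
            (fun ip => ip.1 :: findChildsOfA ps f ip.1 []) by
    simpa using h []
  intro acc
  induction l generalizing acc with
  | nil => simp
  | cons ip l ihl =>
      simp only [List.foldl_cons, List.filter_cons]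
      by_cases h : (ip.2 == parent) = true
      · rw [if_pos h, findA_acc ps f ip.1 (acc ++ [ip.1]), ihl, if_pos h]
        simp
      · rw [if_neg h, ihl, if_neg h]

-- lexicographic helpers for Python list comparison
lemma lex_lt_of_proper_prefix (rp l : List Int) (h : l ≠ []) : rp < rp ++ l := by
  refine (List.lt_iff_lex_lt _ _).2 ?_
  induction rp with
  | nil =>
      cases l with
      | nil => exact absurd rfl h
      | cons x t => exact List.Lex.nil
  | cons a rp ih => exact List.Lex.cons ih

lemma lex_lt_append (rp : List Int) {c c' : Int} (h : c < c') (s t : List Int) :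
    rp ++ c :: s < rp ++ c' :: t := by
  refine (List.lt_iff_lex_lt _ _).2 ?_
  induction rp with
  | nil => exact List.Lex.rel h
  | cons a rp ih => exact List.Lex.cons ih

-- walking up from x inside parent's subtree meets a child of parent first
lemma chain_decomp (ps : List Int) {parent : Int} {cp : List Int}
    (hp : Chain ps parent cp) :
    ∀ {x : Int} {cx : List Int}, Chain ps x cx → cp <:+ cx → cx ≠ cp →
      ∃ c ∈ childrenOf ps parent, x = c ∨ ((c :: cp) <:+ cx ∧ cx ≠ c :: cp) := by
  intro x cx hx
  induction hx with
  | root =>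
      intro hs hne
      rw [List.suffix_nil] at hs
      exact absurd hs.symm hne
  | step h0 h1 hc ih =>
      rename_i j c2
      intro hs hne
      rcases List.suffix_cons_iff.1 hs with heq | hs2
      · exact absurd heq.symm hne
      · by_cases hc2 : c2 = cp
        · have hc' := hc
          rw [hc2] at hc'
          have hpar : PySem.List.pyGetD ps j 0 = parent := by
            cases cp with
            | nil => rw [chain_nil_eq hc', chain_nil_eq hp]
            | cons p t => rw [chain_cons_head hc']; exact (chain_cons_head hp).symm
          exact ⟨j, mem_childrenOf.2 ⟨h0, h1, hpar⟩, Or.inl rfl⟩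
        · obtain ⟨c, hcmem, hcase⟩ := ih hs2 hc2
          refine ⟨c, hcmem, Or.inr ?_⟩
          rcases hcase with heq | ⟨hsfx, hne2⟩
          · have hdet : c2 = c :: cp := chain_det (heq ▸ hc) (chain_child hp hcmem)
            subst hdet
            refine ⟨List.suffix_cons _ _, fun hE => ?_⟩
            have := congrArg List.length hE
            simp only [List.length_cons] at this
            omega
          · refine ⟨hsfx.trans (List.suffix_cons _ _), fun hE => ?_⟩
            have hl := hsfx.length_le
            have h2 := congrArg List.length hE
            simp only [List.length_cons] at hl h2
            omega

-- the root path of anything in child c's subtree extends parent's path by c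
lemma block_key_pre (ps : List Int) {c : Int} {cp : List Int}
    {x : Int} {cx : List Int} (hxc : Chain ps x cx) (hsfx : (c :: cp) <:+ cx) :
    ∃ s, keyOf ps x = cp.reverse ++ c :: s := by
  obtain ⟨pre, rfl⟩ := hsfx
  refine ⟨pre.reverse, ?_⟩
  rw [keyOf_chain hxc, List.reverse_append, List.reverse_cons]
  simp

-- the main DFS characterisation: membership and sortedness of A's output
lemma dfsA_main (ps : List Int) :
    ∀ (f : Nat) (parent : Int) (cp : List Int), Chain ps parent cp →
      ps.length + 1 ≤ f + cp.length →
      (∀ x, x ∈ findChildsOfA ps f parent [] ↔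
          ∃ cx, Chain ps x cx ∧ cp <:+ cx ∧ cx ≠ cp)
      ∧ (findChildsOfA ps f parent []).Pairwise
          (fun a b => keyOf ps a < keyOf ps b) := by
  intro f
  induction f with
  | zero =>
      intro parent cp hp hf
      have := chain_length_le hp
      omega
  | succ f ih =>
      intro parent cp hp hf
      rw [findA_succ]
      have hb : ∀ c ∈ childrenOf ps parent, ps.length + 1 ≤ f + (c :: cp).length := by
        intro c _
        simp only [List.length_cons]
        omega
      constructor
      · intro x
        rw [List.mem_flatMap]
        constructor
        · rintro ⟨c, hcmem, hx⟩
          have hcc : Chain ps c (c :: cp) := chain_child hp hcmem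
          rcases List.mem_cons.1 hx with rfl | hx
          · refine ⟨x :: cp, hcc, List.suffix_cons _ _, fun hE => ?_⟩
            have := congrArg List.length hE
            simp only [List.length_cons] at this
            omega
          · obtain ⟨cx, hxc, hsfx, hne⟩ :=
              ((ih c (c :: cp) hcc (hb c hcmem)).1 x).1 hx
            refine ⟨cx, hxc, (List.suffix_cons _ _).trans hsfx, fun hE => ?_⟩
            have hl := hsfx.length_le
            rw [hE] at hl
            simp only [List.length_cons] at hl
            omega
        · rintro ⟨cx, hxc, hsfx, hne⟩
          obtain ⟨c, hcmem, hcase⟩ := chain_decomp ps hp hxc hsfx hne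
          refine ⟨c, hcmem, ?_⟩
          rcases hcase with rfl | ⟨hsfx2, hne2⟩
          · exact List.mem_cons_self
          · exact List.mem_cons_of_mem _
              (((ih c (c :: cp) (chain_child hp hcmem) (hb c hcmem)).1 x).2
                ⟨cx, hxc, hsfx2, hne2⟩)
      · rw [List.pairwise_flatMap]
        constructor
        · intro c hcmem
          have hcc : Chain ps c (c :: cp) := chain_child hp hcmem
          have ihc := ih c (c :: cp) hcc (hb c hcmem)
          refine List.pairwise_cons.2 ⟨?_, ihc.2⟩
          intro x hx
          obtain ⟨cx, hxc, hsfx, hne⟩ := (ihc.1 x).1 hx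
          obtain ⟨pre, rfl⟩ := hsfx
          rw [keyOf_chain hcc, keyOf_chain hxc, List.reverse_append]
          apply lex_lt_of_proper_prefix
          intro h0
          rw [List.reverse_eq_nil_iff] at h0
          subst h0
          exact hne rfl
        · refine (pairwise_childrenOf ps parent).imp_of_mem ?_
          intro c c' hc hc' hlt x hx y hy
          have hxk : ∃ s, keyOf ps x = cp.reverse ++ c :: s := by
            rcases List.mem_cons.1 hx with rfl | hx
            · exact block_key_pre ps (chain_child hp hc) (List.suffix_refl _)
            · obtain ⟨cx, hxc, hsfx, -⟩ :=
                ((ih c (c :: cp) (chain_child hp hc) (hb c hc)).1 x).1 hx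
              exact block_key_pre ps hxc hsfx
          have hyk : ∃ t, keyOf ps y = cp.reverse ++ c' :: t := by
            rcases List.mem_cons.1 hy with rfl | hy
            · exact block_key_pre ps (chain_child hp hc') (List.suffix_refl _)
            · obtain ⟨cy, hyc, hsfy, -⟩ :=
                ((ih c' (c' :: cp) (chain_child hp hc') (hb c' hc')).1 y).1 hy
              exact block_key_pre ps hyc hsfy
          obtain ⟨s, hs⟩ := hxk
          obtain ⟨t, ht⟩ := hyk
          rw [hs, ht]
          exact lex_lt_append _ hlt _ _

-- ===== VERDICT (by name: the statement is the Claim_ definition above) =====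
theorem new_to_old_indices_py_spec : Claim_equal_new_to_old_indices_py := by
  intro ps _
  simp only [Spec_new_to_old_indices_py, new_to_old_indices_py, new_to_old_indices_py_alt]
  have hmain := dfsA_main ps (ps.length + 1) (-1) [] Chain.root (by simp)
  set D := findChildsOfA ps (ps.length + 1) (-1) [] with hD
  have hmem := hmain.1
  have hpwD := hmain.2
  have hDnodup : D.Nodup :=
    List.Pairwise.imp (fun h he => absurd (he ▸ h) (lt_irrefl _)) hpwD
  have hkeyed :
      (PySem.List.pyRange 0 (PySem.List.len ps) 1).filterMap
          (fun i => (rootPathB ps (ps.length + 1) i []).map (fun p => (p, i)))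
        = ((PySem.List.pyRange 0 (PySem.List.len ps) 1).filter
            (fun i => (chainW ps (ps.length + 1) i).isSome)).map
            (fun i => (keyOf ps i, i)) := by
    generalize PySem.List.pyRange 0 (PySem.List.len ps) 1 = l
    induction l with
    | nil => rfl
    | cons i l ihl =>
        rw [List.filterMap_cons, List.filter_cons, rootPathB_eq_chainW ps i]
        cases hw : chainW ps (ps.length + 1) i with
        | none => simpa using ihl
        | some c =>
            have hk : keyOf ps i = c.reverse := by unfold keyOf; rw [hw]; rfl
            simp [hk, ihl]
  rw [hkeyed]
  have hperm : (D.map (fun i => (keyOf ps i, i))).Perm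
      (((PySem.List.pyRange 0 (PySem.List.len ps) 1).filter
          (fun i => (chainW ps (ps.length + 1) i).isSome)).map (fun i => (keyOf ps i, i))) := by
    refine List.Perm.map _ ?_
    refine (List.perm_ext_iff_of_nodup hDnodup
      (List.Nodup.filter _ (PySem.List.nodup_pyRange_one _ _))).2 ?_
    intro x
    rw [List.mem_filter, hmem x, PySem.List.mem_pyRange_one]
    constructor
    · rintro ⟨cx, hxc, -, hne⟩
      cases hxc with
      | root => exact absurd rfl hne
      | step h0 h1 hc =>
          rename_i j c
          refine ⟨⟨h0, by simpa using h1⟩, ?_⟩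
          rw [chainW_stable_iff.2 (Chain.step h0 h1 hc)]
          rfl
    · rintro ⟨⟨hx0, hx1⟩, hsome⟩
      cases hw : chainW ps (ps.length + 1) x with
      | none => rw [hw] at hsome; simp at hsome
      | some c =>
          have hcx := (chainW_some hw).1
          refine ⟨c, hcx, List.nil_suffix, fun hE => ?_⟩
          subst hE
          have := chain_nil_eq hcx
          omega
  have hpw2 : (D.map (fun i => (keyOf ps i, i))).Pairwise (fun a b => a.1 < b.1) :=
    List.pairwise_map.2 hpwD
  set K := ((PySem.List.pyRange 0 (PySem.List.len ps) 1).filter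
      (fun i => (chainW ps (ps.length + 1) i).isSome)).map (fun i => (keyOf ps i, i)) with hK
  -- bridge between the two (propositionally equal) order instances on List Int
  have hbridge : PySem.List.sorted K (fun t => t.1) false
      = @PySem.List.sorted (List Int × Int) (List Int)
          (@Preorder.toLT _ (@PartialOrder.toPreorder _ (@LinearOrder.toPartialOrder _ List.instLinearOrder)))
          (@LinearOrder.toDecidableLT _ List.instLinearOrder) K (fun t => t.1) false := by
    congr 1
  rw [hbridge, PySem.List.sorted_eq_of_perm_of_pairwise_lt K _ (fun t => t.1) hperm hpw2]
  simp [List.map_map, Function.comp_def]
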